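-- pv_equiv track=rewrite | github.com/JHeirons/Habhub-Data-Analysis | main.py | addSeconds
-- ===== SOURCE A (Python) =====
-- def addSeconds(t):
--     s1 = ['0','1','2','3','4','5']
--     s2 = ['0','1','2','3','4','5','6','7','8','9']
--     seconds = []
--     launch = []
--     for s1_1 in s1:
--         for s2_1 in s2:
--             s = s1_1 + s2_1
--             seconds.append(s)
--     for s in seconds:
--         ntime = t + s
--         launch.append(ntime)
--
--     return launch
-- ===== SOURCE B (Python) =====
-- def addSeconds(t):
--     return [t + f"{i:02d}" for i in range(60)]
-- ===== Notes on version B (the rewrite author's own statement) =====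
-- stated objective: idiomatic
-- what changed: B replaces the nested tens x units string cross-product plus a second prepend loop with a single flat range(60) formatted with zero-padding.
import Mathlib
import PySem

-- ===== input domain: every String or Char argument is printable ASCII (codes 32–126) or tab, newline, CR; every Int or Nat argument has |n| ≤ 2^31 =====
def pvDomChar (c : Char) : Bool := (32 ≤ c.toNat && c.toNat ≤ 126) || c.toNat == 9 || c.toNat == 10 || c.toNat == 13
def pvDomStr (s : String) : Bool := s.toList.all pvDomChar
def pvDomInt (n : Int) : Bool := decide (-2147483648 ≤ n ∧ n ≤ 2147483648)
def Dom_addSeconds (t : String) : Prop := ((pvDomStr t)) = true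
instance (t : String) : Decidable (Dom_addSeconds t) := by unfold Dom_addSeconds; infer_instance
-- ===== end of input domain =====

-- B replaces A's tens×units string cross-product and second prepend loop with one flat range 0..59, zero-padded (idiomatic; same cost).


-- ===== PORT A =====
-- literal port of A: cross-product of tens and units digit lists, then a prepend loop
def addSeconds (t : String) : List String :=
  let s1 : List String := ["0","1","2","3","4","5"]
  let s2 : List String := ["0","1","2","3","4","5","6","7","8","9"]
  let seconds : List String :=
    s1.foldl (fun acc s1_1 =>
      s2.foldl (fun acc2 s2_1 => acc2 ++ [s1_1 ++ s2_1]) acc) []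
  seconds.foldl (fun launch s => launch ++ [t ++ s]) []

-- ===== PORT B =====
-- port of B: one flat range 0..59, each value zero-padded to two digits (f"{i:02d}" for 0 ≤ i < 60)
def addSeconds_alt (t : String) : List String :=
  (PySem.List.pyRange 0 60 1).map (fun i =>
    t ++ (if i < 10 then "0" ++ PySem.Int.toStr i else PySem.Int.toStr i))

-- ===== PRECONDITION & SPEC =====
def Spec_addSeconds (t : String) (out : List String) : Prop := out = addSeconds_alt t
instance (t : String) (out : List String) : Decidable (Spec_addSeconds t out) := by unfold Spec_addSeconds; infer_instance

-- ===== CLAIM (what is proved, stated in full; the proofs are below) =====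
def Claim_equal_addSeconds : Prop := ∀ (t : String), Dom_addSeconds t → Spec_addSeconds t (addSeconds t)

-- ===== LEMMAS AND PROOFS =====
-- the 60 second-strings "00".."59", the common intermediate of both ports
def secsLit : List String := ["00", "01", "02", "03", "04", "05", "06", "07", "08", "09", "10", "11", "12", "13", "14", "15", "16", "17", "18", "19", "20", "21", "22", "23", "24", "25", "26", "27", "28", "29", "30", "31", "32", "33", "34", "35", "36", "37", "38", "39", "40", "41", "42", "43", "44", "45", "46", "47", "48", "49", "50", "51", "52", "53", "54", "55", "56", "57", "58", "59"]

-- A's seconds list (closed) is exactly secsLit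
theorem a_seconds_eq :
    (["0","1","2","3","4","5"].foldl (fun acc s1_1 =>
      ["0","1","2","3","4","5","6","7","8","9"].foldl
        (fun acc2 s2_1 => acc2 ++ [s1_1 ++ s2_1]) acc) ([] : List String)) = secsLit := by
  decide

-- B's formatted range (closed) is exactly secsLit
theorem b_fmt_eq :
    (PySem.List.pyRange 0 60 1).map
      (fun i => if i < 10 then "0" ++ PySem.Int.toStr i else PySem.Int.toStr i) = secsLit := by
  decide


-- ===== VERDICT (by name: the statement is the Claim_ definition above) =====
theorem addSeconds_spec : Claim_equal_addSeconds := by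
  intro t _
  show addSeconds t = addSeconds_alt t
  have hA : addSeconds t = secsLit.map (fun s => t ++ s) := by
    simp only [addSeconds]
    rw [a_seconds_eq, PySem.List.foldl_append_singleton_eq_map]
    simp
  have hB : addSeconds_alt t = secsLit.map (fun s => t ++ s) := by
    simp only [addSeconds_alt]
    rw [show (fun i => t ++ (if i < 10 then "0" ++ PySem.Int.toStr i else PySem.Int.toStr i))
          = (fun s => t ++ s) ∘ (fun i => if i < 10 then "0" ++ PySem.Int.toStr i else PySem.Int.toStr i) from rfl,
        ← List.map_map, b_fmt_eq]
  rw [hA, hB]
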